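-- pv_equiv track=rewrite | github.com/dpausp/batou | src/batou/config_toml.py | _find_line_for_key
-- ===== SOURCE A (Python) =====
-- def _find_line_for_key(content: str, location: str) -> int | None:
--     """Find the line number for a given location path.
--
--     Args:
--         content: Original TOML content
--         location: Dot-separated path like "environment.update_method"
--
--     Returns:
--         1-indexed line number or None if not found
--     """
--     parts = location.split(".")
--     if not parts:
--         return None
--
--     lines = content.split("\n")
--     current_section = None
--     target_section = None
--     target_key = None
--
--     # Determine what we're looking for
--     if len(parts) == 1:
--         # Top-level key (rare in our schema)
--         target_key = parts[0]
--     elif len(parts) == 2: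
--         # Section.key like "environment.update_method"
--         target_section = parts[0]
--         target_key = parts[1]
--     elif len(parts) >= 3:
--         # Nested like "hosts.localhost" or deeper
--         target_section = parts[0]
--         target_key = parts[-1]
--
--     for i, line in enumerate(lines, 1):
--         stripped = line.strip()
--
--         # Track current section
--         if stripped.startswith("[") and stripped.endswith("]"):
--             section_name = stripped[1:-1].strip()
--             # Handle quoted section names
--             if section_name.startswith('"') and section_name.endswith('"'):
--                 section_name = section_name[1:-1]
--             current_section = section_name.split(".")[0]  # Get first part for nested
--
--         # Check for key match
--         if "=" in stripped:
--             key_part = stripped.split("=", 1)[0].strip()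
--             # Remove quotes from key if present
--             if key_part.startswith('"') and key_part.endswith('"'):
--                 key_part = key_part[1:-1]
--
--             if key_part == target_key:
--                 # Check if we're in the right section
--                 if target_section is None or current_section == target_section:
--                     return i
--
--     # If not found with exact section match, try to find key in matching section
--     # This handles cases where the key is nested (e.g., resolver."hostname")
--     if target_section:
--         in_target_section = False
--         for i, line in enumerate(lines, 1):
--             stripped = line.strip()
--
--             # Track section changes
--             if stripped.startswith("[") and stripped.endswith("]"):
--                 section_name = stripped[1:-1].strip()
--                 if section_name.startswith('"') and section_name.endswith('"'):
--                     section_name = section_name[1:-1]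
--                 in_target_section = section_name == target_section
--                 continue
--
--             # Check for key in target section
--             if in_target_section and "=" in stripped:
--                 key_part = stripped.split("=", 1)[0].strip()
--                 if key_part.startswith('"') and key_part.endswith('"'):
--                     key_part = key_part[1:-1]
--                 if key_part == target_key:
--                     return i
--
--     return None
-- ===== SOURCE B (Python) =====
-- def _unquote(s):
--     """Strip one layer of surrounding double quotes, if present."""
--     if s.startswith('"') and s.endswith('"'):
--         return s[1:-1]
--     return s
--
--
-- def _find_line_for_key(content, location):
--     """Index-based lookup: one pass builds key -> [(line_no, section)], then resolve."""
--     parts = location.split(".")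
--     if len(parts) == 1:
--         target_section, target_key = None, parts[0]
--     else:
--         target_section, target_key = parts[0], parts[-1]
--
--     index = {}
--     current_section = None
--     for i, line in enumerate(content.split("\n"), 1):
--         stripped = line.strip()
--         if stripped.startswith("[") and stripped.endswith("]"):
--             current_section = _unquote(stripped[1:-1].strip()).split(".")[0]
--         if "=" in stripped:
--             key = _unquote(stripped.split("=", 1)[0].strip())
--             index.setdefault(key, []).append((i, current_section))
--
--     for lineno, section in index.get(target_key, []):
--         if target_section is None or section == target_section:
--             return lineno
--     return None
-- ===== Notes on version B (the rewrite author's own statement) =====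
-- stated objective: alternative
-- what changed: A's two sequential scans over the lines (the second of which is provably redundant) are replaced by a single pass that builds an ordered index mapping each key to its (line number, section) occurrences, followed by one lookup that picks the first occurrence in the requested section.
import Mathlib
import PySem

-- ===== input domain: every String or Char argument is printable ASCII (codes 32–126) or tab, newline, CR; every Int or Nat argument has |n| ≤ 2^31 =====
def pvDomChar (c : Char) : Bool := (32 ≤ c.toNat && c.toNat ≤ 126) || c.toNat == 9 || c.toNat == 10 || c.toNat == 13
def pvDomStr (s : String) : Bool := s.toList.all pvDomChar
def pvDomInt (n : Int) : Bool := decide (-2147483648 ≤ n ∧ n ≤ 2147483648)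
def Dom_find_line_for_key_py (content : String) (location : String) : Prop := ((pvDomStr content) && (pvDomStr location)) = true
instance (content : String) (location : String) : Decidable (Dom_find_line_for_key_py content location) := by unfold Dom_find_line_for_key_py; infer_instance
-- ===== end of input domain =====

-- B replaces A's two sequential line scans (the second is provably redundant) by one pass that
-- builds an ordered index key ↦ [(line, section)] and a single lookup afterwards (objective: alternative).

-- ===== PORT A =====
-- A's source repeats the quote-stripping snippet inline four times; it is factored here verbatim.
def pvA_unquote (s : List Char) : List Char :=
  if PySem.Chars.startswith s ['"'] && PySem.Chars.endswith s ['"'] then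
    PySem.Chars.slice s (some 1) (some (-1))
  else s

-- first loop of A: track current_section (first dotted part), return i on key+section match
def pvA_scan1 (tk : List Char) (ts? : Option (List Char)) :
    List (List Char) → Int → Option (List Char) → Option Int
  | [], _, _ => none
  | line :: rest, i, cs =>
    let st := PySem.Chars.strip line
    let cs' := if PySem.Chars.startswith st ['['] && PySem.Chars.endswith st [']'] then
        some (PySem.List.pyGetD
          (PySem.Chars.splitOn (pvA_unquote (PySem.Chars.strip (PySem.Chars.slice st (some 1) (some (-1))))) ['.']) 0 [])
      else cs
    if PySem.Chars.isIn ['='] st &&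
        (pvA_unquote (PySem.Chars.strip (PySem.List.pyGetD (PySem.Chars.splitOnMax st ['='] 1) 0 [])) == tk) &&
        (ts?.isNone || cs' == ts?) then
      some i
    else pvA_scan1 tk ts? rest (i + 1) cs'

-- second loop of A: in_target_section flag against the FULL section name, 'continue' on section lines
def pvA_scan2 (tk ts : List Char) : List (List Char) → Int → Bool → Option Int
  | [], _, _ => none
  | line :: rest, i, b =>
    let st := PySem.Chars.strip line
    if PySem.Chars.startswith st ['['] && PySem.Chars.endswith st [']'] then
      pvA_scan2 tk ts rest (i + 1)
        ((pvA_unquote (PySem.Chars.strip (PySem.Chars.slice st (some 1) (some (-1))))) == ts)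
    else if b && PySem.Chars.isIn ['='] st &&
        (pvA_unquote (PySem.Chars.strip (PySem.List.pyGetD (PySem.Chars.splitOnMax st ['='] 1) 0 [])) == tk) then
      some i
    else pvA_scan2 tk ts rest (i + 1) b

def find_line_for_key_py (content : String) (location : String) : Option Int :=
  let parts := PySem.Chars.splitOn location.toList ['.']
  if parts = [] then none
  else
    let lines := PySem.Chars.splitOn content.toList ['\n']
    let p :=
      if parts.length = 1 then ((none : Option (List Char)), PySem.List.pyGetD parts 0 [])
      else if parts.length = 2 then
        (some (PySem.List.pyGetD parts 0 []), PySem.List.pyGetD parts 1 [])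
      else (some (PySem.List.pyGetD parts 0 []), PySem.List.pyGetD parts (-1) [])
    match pvA_scan1 p.2 p.1 lines 1 none with
    | some i => some i
    | none =>
      match p.1 with
      | some ts => if ts = [] then none else pvA_scan2 p.2 ts lines 1 false  -- 'if target_section:' (falsy on "")
      | none => none

-- ===== PORT B =====
def pvB_unquote (s : List Char) : List Char :=
  if PySem.Chars.startswith s ['"'] && PySem.Chars.endswith s ['"'] then
    PySem.Chars.slice s (some 1) (some (-1))
  else s

def pvB_section (st : List Char) (cs : Option (List Char)) : Option (List Char) :=
  if PySem.Chars.startswith st ['['] && PySem.Chars.endswith st [']'] then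
    some (PySem.List.pyGetD
      (PySem.Chars.splitOn (pvB_unquote (PySem.Chars.strip (PySem.Chars.slice st (some 1) (some (-1))))) ['.']) 0 [])
  else cs

def pvB_keyOf (st : List Char) : List Char :=
  pvB_unquote (PySem.Chars.strip (PySem.List.pyGetD (PySem.Chars.splitOnMax st ['='] 1) 0 []))

-- single pass: build the ordered index key ↦ [(line number, section at that line)]
def pvB_build : List (List Char) → PySem.Dict (List Char) (List (Int × Option (List Char))) →
    Option (List Char) → Int → PySem.Dict (List Char) (List (Int × Option (List Char)))
  | [], d, _, _ => d
  | line :: rest, d, cs, i =>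
    let st := PySem.Chars.strip line
    let cs' := pvB_section st cs
    let d' := if PySem.Chars.isIn ['='] st then
        PySem.Dict.modify d (pvB_keyOf st) [] (fun l => l ++ [(i, cs')])
      else d
    pvB_build rest d' cs' (i + 1)

def find_line_for_key_py_alt (content : String) (location : String) : Option Int :=
  let parts := PySem.Chars.splitOn location.toList ['.']
  let p :=
    if parts.length = 1 then ((none : Option (List Char)), PySem.List.pyGetD parts 0 [])
    else (some (PySem.List.pyGetD parts 0 []), PySem.List.pyGetD parts (-1) [])
  let idx := pvB_build (PySem.Chars.splitOn content.toList ['\n']) PySem.Dict.empty none 1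
  ((PySem.Dict.getD idx p.2 []).find? (fun e => p.1.isNone || e.2 == p.1)).map Prod.fst

-- ===== PRECONDITION & SPEC =====
def Spec_find_line_for_key_py (content : String) (location : String) (out : Option Int) : Prop := out = find_line_for_key_py_alt content location
instance (content : String) (location : String) (out : Option Int) : Decidable (Spec_find_line_for_key_py content location out) := by unfold Spec_find_line_for_key_py; infer_instance

-- ===== CLAIM (what is proved, stated in full; the proofs are below) =====
def Claim_equal_find_line_for_key_py : Prop := ∀ (content : String) (location : String), Dom_find_line_for_key_py content location → Spec_find_line_for_key_py content location (find_line_for_key_py content location)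

-- ===== LEMMAS AND PROOFS =====

-- an early-return 'if' that produced no value: the condition was false and the rest produced none
theorem pv_ite_none {c : Prop} [Decidable c] {i : Int} {x : Option Int}
    (h : (if c then some i else x) = none) : x = none ∧ ¬ c := by
  by_cases hc : c
  · rw [if_pos hc] at h; exact absurd h (by simp)
  · rw [if_neg hc] at h; exact ⟨h, hc⟩


-- characterisation of PySem.Chars.splitOn s ['.']: the first piece is s.takeWhile (· != '.')
theorem pv_splitOn_dot_go (fuel : Nat) : ∀ (l cur : List Char) (acc : List (List Char)), l.length ≤ fuel →
    ∃ t, PySem.Chars.splitOn.go ['.'] fuel l cur acc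
      = acc.reverse ++ [cur.reverse ++ l.takeWhile (· != '.')] ++ t := by
  induction fuel with
  | zero =>
    intro l cur acc hf
    have hl : l = [] := List.eq_nil_of_length_eq_zero (Nat.le_zero.mp hf)
    subst hl
    exact ⟨[], by simp [PySem.Chars.splitOn.go]⟩
  | succ n ih =>
    intro l cur acc hf
    cases l with
    | nil => exact ⟨[], by simp [PySem.Chars.splitOn.go]⟩
    | cons c rest =>
      by_cases hc : c = '.'
      · subst hc
        obtain ⟨t', ht'⟩ := ih rest [] (cur.reverse :: acc) (by simpa using Nat.le_of_succ_le_succ hf)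
        refine ⟨rest.takeWhile (· != '.') :: t', ?_⟩
        simp [PySem.Chars.splitOn.go, List.isPrefixOf, ht']
      · obtain ⟨t', ht'⟩ := ih rest (c :: cur) acc (by simpa using Nat.le_of_succ_le_succ hf)
        refine ⟨t', ?_⟩
        have hpre : (['.'] : List Char).isPrefixOf (c :: rest) = false := by
          simp [List.isPrefixOf]; exact fun h => absurd h.symm hc
        simp [PySem.Chars.splitOn.go, hpre, ht', hc]


theorem pv_splitOn_dot (s : List Char) :
    ∃ t, PySem.Chars.splitOn s ['.'] = s.takeWhile (· != '.') :: t := by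
  obtain ⟨t, ht⟩ := pv_splitOn_dot_go (s.length + 1) s [] [] (by omega)
  exact ⟨t, by simpa [PySem.Chars.splitOn] using ht⟩

theorem pv_first_eq_takeWhile (s : List Char) :
    PySem.List.pyGetD (PySem.Chars.splitOn s ['.']) 0 [] = s.takeWhile (· != '.') := by
  obtain ⟨t, ht⟩ := pv_splitOn_dot_go (s.length + 1) s [] [] (by omega)
  simp only [PySem.Chars.splitOn] at *
  rw [ht]
  simp [PySem.List.pyGetD_zero_cons]


-- B's index-then-lookup equals A's first scan
theorem pv_build_scan (tk : List Char) (ts? : Option (List Char)) (lines : List (List Char)) :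
    ∀ (d : PySem.Dict (List Char) (List (Int × Option (List Char)))) (cs : Option (List Char)) (i : Int),
    ((PySem.Dict.getD (pvB_build lines d cs i) tk []).find? (fun e => ts?.isNone || e.2 == ts?)).map Prod.fst
      = (((PySem.Dict.getD d tk []).find? (fun e => ts?.isNone || e.2 == ts?)).map Prod.fst).or
          (pvA_scan1 tk ts? lines i cs) := by
  induction lines with
  | nil => intro d cs i; simp [pvB_build, pvA_scan1]
  | cons line rest ih =>
    intro d cs i
    simp only [pvB_build, pvA_scan1, pvB_section, pvB_keyOf, pvB_unquote, pvA_unquote]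
    set st := PySem.Chars.strip line with hst
    set cs' := if PySem.Chars.startswith st ['['] && PySem.Chars.endswith st [']'] then
        some (PySem.List.pyGetD
          (PySem.Chars.splitOn (if PySem.Chars.startswith (PySem.Chars.strip (PySem.Chars.slice st (some 1) (some (-1)))) ['"'] && PySem.Chars.endswith (PySem.Chars.strip (PySem.Chars.slice st (some 1) (some (-1)))) ['"'] then
    PySem.Chars.slice (PySem.Chars.strip (PySem.Chars.slice st (some 1) (some (-1)))) (some 1) (some (-1))
  else PySem.Chars.strip (PySem.Chars.slice st (some 1) (some (-1)))) ['.']) 0 [])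
      else cs with hcs'
    set kp := (if PySem.Chars.startswith (PySem.Chars.strip (PySem.List.pyGetD (PySem.Chars.splitOnMax st ['='] 1) 0 [])) ['"'] && PySem.Chars.endswith (PySem.Chars.strip (PySem.List.pyGetD (PySem.Chars.splitOnMax st ['='] 1) 0 [])) ['"'] then
    PySem.Chars.slice (PySem.Chars.strip (PySem.List.pyGetD (PySem.Chars.splitOnMax st ['='] 1) 0 [])) (some 1) (some (-1))
  else PySem.Chars.strip (PySem.List.pyGetD (PySem.Chars.splitOnMax st ['='] 1) 0 [])) with hkp
    by_cases hin : PySem.Chars.isIn ['='] st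
    · by_cases hk : kp = tk
      · subst hk
        rw [ih]
        have hent : PySem.Dict.getD (PySem.Dict.modify d kp [] (fun l => l ++ [(i, cs')])) kp []
            = PySem.Dict.getD d kp [] ++ [(i, cs')] := by
          simp [PySem.Dict.modify, PySem.Dict.getD, PySem.Dict.get?_insert_self]
        simp only [hin, if_true, hent, List.find?_append, Option.map_or, Option.or_assoc]
        have hb : (kp == kp) = true := by simp
        rw [hb]
        congr 1
        by_cases hc : (ts?.isNone || cs' == ts?) = true
        · simp [List.find?, hc]
        · simp only [Bool.not_eq_true] at hc
          simp [List.find?, hc]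
      · rw [ih]
        simp only [hin, if_true]
        have hent : PySem.Dict.getD (PySem.Dict.modify d kp [] (fun l => l ++ [(i, cs')])) tk []
            = PySem.Dict.getD d tk [] := by
          simp [PySem.Dict.modify, PySem.Dict.getD, PySem.Dict.get?_insert_of_ne _ _ (Ne.symm hk)]
        rw [hent]
        have hbeq : (kp == tk) = false := by simpa using hk
        simp [hbeq]
    · simp only [hin, Bool.false_and]
      rw [if_neg (by simp)]
      exact ih d cs' (i+1)

-- A's second scan is redundant: it finds nothing the first scan did not
theorem pv_scan2_none (tk ts : List Char) (hdot : ts.takeWhile (· != '.') = ts) :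
    ∀ (lines : List (List Char)) (i : Int) (cs : Option (List Char)) (b : Bool),
    (b = true → cs = some ts) →
    pvA_scan1 tk (some ts) lines i cs = none → pvA_scan2 tk ts lines i b = none := by
  intro lines
  induction lines with
  | nil => intro i cs b _ _; rfl
  | cons line rest ih =>
    intro i cs b hb h1
    simp only [pvA_scan1] at h1
    simp only [pvA_scan2]
    by_cases hbr : (PySem.Chars.startswith (PySem.Chars.strip line) ['['] &&
        PySem.Chars.endswith (PySem.Chars.strip line) [']']) = true
    · rw [if_pos hbr] at h1 ⊢
      refine ih (i + 1) _ _ ?_ (pv_ite_none h1).1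
      intro hbt
      have hname : pvA_unquote (PySem.Chars.strip
          (PySem.Chars.slice (PySem.Chars.strip line) (some 1) (some (-1)))) = ts := by
        simpa using hbt
      rw [hname, pv_first_eq_takeWhile, hdot]
    · rw [if_neg hbr] at h1 ⊢
      have h1' := pv_ite_none h1
      by_cases hbb : b = true
      · have hcs : cs = some ts := hb hbb
        subst hcs hbb
        have hck : ¬ ((PySem.Chars.isIn ['='] (PySem.Chars.strip line) &&
            (pvA_unquote (PySem.Chars.strip (PySem.List.pyGetD
              (PySem.Chars.splitOnMax (PySem.Chars.strip line) ['='] 1) 0 [])) == tk)) = true) := by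
          intro h
          exact h1'.2 (by simp_all)
        rw [if_neg (by simpa [Bool.and_assoc] using hck)]
        exact ih (i + 1) _ _ (fun _ => rfl) h1'.1
      · have hbf : b = false := by simpa using hbb
        subst hbf
        rw [if_neg (by simp)]
        exact ih (i + 1) _ _ (by simp) h1'.1

-- both resolutions against A's two scans, for any targets whose section part is dot-free
theorem pv_main (lines : List (List Char)) (tk : List Char) (ts? : Option (List Char))
    (hdot : ∀ ts, ts? = some ts → ts.takeWhile (· != '.') = ts) :
    (match pvA_scan1 tk ts? lines 1 none with
     | some i => some i
     | none => match ts? with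
       | some ts => if ts = [] then none else pvA_scan2 tk ts lines 1 false
       | none => none)
    = ((PySem.Dict.getD (pvB_build lines PySem.Dict.empty none 1) tk []).find?
        (fun e => ts?.isNone || e.2 == ts?)).map Prod.fst := by
  rw [pv_build_scan]
  have hempty : PySem.Dict.getD
      (PySem.Dict.empty : PySem.Dict (List Char) (List (Int × Option (List Char)))) tk [] = [] := rfl
  rw [hempty]
  simp only [List.find?_nil, Option.map_none, Option.none_or]
  cases hscan : pvA_scan1 tk ts? lines 1 none with
  | some i => rfl
  | none =>
    cases ts? with
    | none => rfl
    | some ts =>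
      simp only []
      by_cases hts : ts = []
      · rw [if_pos hts]
      · rw [if_neg hts]
        exact (pv_scan2_none tk ts (hdot ts rfl) lines 1 none false (by simp) hscan)

-- ===== VERDICT (by name: the statement is the Claim_ definition above) =====
theorem find_line_for_key_py_spec : Claim_equal_find_line_for_key_py := by
  intro content location _
  unfold Spec_find_line_for_key_py find_line_for_key_py find_line_for_key_py_alt
  obtain ⟨t0, hparts⟩ := pv_splitOn_dot location.toList
  rw [if_neg (by rw [hparts]; simp)]
  have hfirst := pv_first_eq_takeWhile location.toList
  by_cases hl1 : (PySem.Chars.splitOn location.toList ['.']).length = 1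
  · simp only [if_pos hl1]
    exact pv_main _ _ none (by simp)
  · simp only [if_neg hl1]
    have hdot : ∀ ts, (some (PySem.List.pyGetD (PySem.Chars.splitOn location.toList ['.']) 0 []) :
        Option (List Char)) = some ts → ts.takeWhile (· != '.') = ts := by
      intro ts hts
      have : ts = location.toList.takeWhile (· != '.') := by
        rw [← hfirst]; exact (Option.some_inj.mp hts).symm
      rw [this, List.takeWhile_idem]
    by_cases hl2 : (PySem.Chars.splitOn location.toList ['.']).length = 2
    · simp only [if_pos hl2]
      have hlast : PySem.List.pyGetD (PySem.Chars.splitOn location.toList ['.']) 1 []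
          = PySem.List.pyGetD (PySem.Chars.splitOn location.toList ['.']) (-1) [] := by
        obtain ⟨a, b, hab⟩ := List.length_eq_two.mp hl2
        rw [hab]
        simp [pysem]
      rw [hlast]
      exact pv_main _ _ _ hdot
    · simp only [if_neg hl2]
      exact pv_main _ _ _ hdot
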